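-- pv_equiv track=rewrite | github.com/AlexanderMcCormack/CS1 | CSII functions assignment.py | last_name
-- ===== SOURCE A (Python) =====
-- def reverse_string(name):
--     '''
--     takes a string and reverses it
--     Args:
--          return thing(str): context
--     Returns:
--         a reversed string :
--     '''
--     return name[::-1]
--
-- def last_name(name):
--     output = ''
--     for letter in name [::-1]:
--         if letter == " ":
--             break
--         else:
--                output = output + letter
--     lastname = reverse_string(output)
--     return lastname
-- ===== SOURCE B (Python) =====
-- def last_name(name):
--     last = -1
--     for i, ch in enumerate(name):
--         if ch == " ":
--             last = i
--     return name[last + 1:]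
-- ===== Notes on version B (the rewrite author's own statement) =====
-- stated objective: simpler
-- what changed: B does one forward pass keeping the index of the last space and returns the slice after it, instead of reversing the string, accumulating characters one-by-one until a space, and reversing the accumulator back.
import Mathlib
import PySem

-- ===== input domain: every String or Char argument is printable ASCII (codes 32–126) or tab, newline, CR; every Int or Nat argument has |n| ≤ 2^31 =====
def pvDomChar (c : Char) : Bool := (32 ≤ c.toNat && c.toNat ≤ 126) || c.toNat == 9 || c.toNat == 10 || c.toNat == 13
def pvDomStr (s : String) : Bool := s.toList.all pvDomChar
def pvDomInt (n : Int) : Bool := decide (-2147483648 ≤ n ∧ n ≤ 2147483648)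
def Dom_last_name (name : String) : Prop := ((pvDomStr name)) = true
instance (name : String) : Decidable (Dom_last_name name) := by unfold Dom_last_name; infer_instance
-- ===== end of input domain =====

-- B replaces A's reverse/accumulate/re-reverse with a single forward pass that tracks the last space index and slices after it; objective: simpler.


-- ===== PORT A =====
def reverse_string (name : String) : String := String.ofList name.toList.reverse

-- the 'for letter in name[::-1]: if letter == " ": break else output = output + letter' loop
def lastNameLoopA : List Char → List Char → List Char
  | [], out => out
  | c :: cs, out => if c = ' ' then out else lastNameLoopA cs (out ++ [c])

def last_name (name : String) : String :=
  reverse_string (String.ofList (lastNameLoopA name.toList.reverse []))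

-- ===== PORT B =====
def last_name_alt (name : String) : String :=
  let last : Int :=
    (PySem.List.enumerate name.toList 0).foldl
      (fun acc p => if p.2 = ' ' then p.1 else acc) (-1)
  String.ofList (PySem.List.slice name.toList (some (last + 1)) none)

-- ===== PRECONDITION & SPEC =====
def Spec_last_name (name : String) (out : String) : Prop := out = last_name_alt name
instance (name : String) (out : String) : Decidable (Spec_last_name name out) := by unfold Spec_last_name; infer_instance

-- ===== CLAIM (what is proved, stated in full; the proofs are below) =====
def Claim_equal_last_name : Prop := ∀ (name : String), Dom_last_name name → Spec_last_name name (last_name name)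

-- ===== LEMMAS AND PROOFS =====

theorem lastNameLoopA_eq_takeWhile (l out : List Char) :
    lastNameLoopA l out = out ++ l.takeWhile (fun c => !(c == ' ')) := by
  induction l generalizing out with
  | nil => simp [lastNameLoopA]
  | cons c cs ih =>
    by_cases h : c = ' ' <;> simp [lastNameLoopA, h, ih]

theorem enumerate_append_singleton (xs : List Char) (x : Char) (s : Int) :
    PySem.List.enumerate (xs ++ [x]) s
      = PySem.List.enumerate xs s ++ [((s + xs.length : Int), x)] := by
  induction xs generalizing s with
  | nil => simp [PySem.List.enumerate_cons, PySem.List.enumerate_nil]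
  | cons y ys ih =>
    simp only [List.cons_append, PySem.List.enumerate_cons, ih]
    simp; ring_nf

-- B's loop as a named fold, for the lemmas below
def lastIdxFold (l : List Char) (s a : Int) : Int :=
  (PySem.List.enumerate l s).foldl (fun acc p => if p.2 = ' ' then p.1 else acc) a

theorem lastIdxFold_bounds (l : List Char) (s a : Int)
    (h1 : -1 ≤ a) (h2 : a < s) :
    -1 ≤ lastIdxFold l s a ∧ lastIdxFold l s a < s + l.length := by
  induction l generalizing s a with
  | nil => simp [lastIdxFold, PySem.List.enumerate_nil]; omega
  | cons c cs ih =>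
    simp only [lastIdxFold, PySem.List.enumerate_cons, List.foldl_cons] at *
    by_cases h : c = ' '
    · have := ih (s + 1) s (by omega) (by omega)
      simp only [h, ite_true, List.length_cons]
      push_cast at *
      omega
    · have := ih (s + 1) a (by omega) (by omega)
      simp only [h, ite_false, List.length_cons]
      push_cast at *
      omega

theorem main_list (l : List Char) :
    (lastNameLoopA l.reverse []).reverse = l.drop (lastIdxFold l 0 (-1) + 1).toNat := by
  induction l using List.reverseRecOn with
  | nil => simp [lastNameLoopA, lastIdxFold, PySem.List.enumerate_nil]
  | append_singleton xs x ih =>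
    have hbx := lastIdxFold_bounds xs 0 (-1) (by omega) (by omega)
    rw [lastNameLoopA_eq_takeWhile] at *
    simp only [List.reverse_append, List.reverse_cons, List.reverse_nil,
      List.nil_append, List.cons_append, List.takeWhile_cons,
      lastIdxFold, enumerate_append_singleton, List.foldl_append, List.foldl_cons,
      List.foldl_nil] at *
    by_cases h : x = ' '
    · have hx : (!(x == ' ')) = false := by simp [h]
      rw [hx, if_neg (by simp), if_pos h, List.reverse_nil]
      refine (List.drop_eq_nil_of_le ?_).symm
      simp only [List.length_append, List.length_cons, List.length_nil]
      omega
    · have hx : (!(x == ' ')) = true := by simp [h]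
      rw [hx, if_pos rfl, if_neg h, List.reverse_cons, ih,
        List.drop_append_of_le_length (by simp; omega)]

-- ===== VERDICT (by name: the statement is the Claim_ definition above) =====
theorem last_name_spec : Claim_equal_last_name := by
  intro name _
  show last_name name = last_name_alt name
  have hb := lastIdxFold_bounds name.toList 0 (-1) (by omega) (by omega)
  show String.ofList (String.ofList (lastNameLoopA name.toList.reverse [])).toList.reverse
      = String.ofList (PySem.List.slice name.toList (some (lastIdxFold name.toList 0 (-1) + 1)) none)
  rw [PySem.List.slice_from name.toList (by omega), String.toList_ofList]
  exact congrArg String.ofList (main_list name.toList)
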